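-- pv_equiv track=rewrite | github.com/lixixi89055465/leetcode_py | leetcode/800/828_uniqueLetterString_hard.py | uniqueLetterString
-- ===== SOURCE A (Python) =====
-- import collections
--
-- def uniqueLetterString(s):
--     n = len(s)
--     m = collections.defaultdict(list)
--     for i, v in enumerate(s):
--         m[v].append(i)
--     ans = 0
--     for k in m:
--         m[k] = [-1] + m[k] + [n]
--         for i in range(1, len(m[k]) - 1):
--             ans += (m[k][i] - m[k][i - 1]) * (m[k][i + 1] - m[k][i])
--     return ans
--
-- s = "LEETCODE"
-- ===== SOURCE B (Python) =====
-- def uniqueLetterString(s):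
--     n = len(s)
--     last = {}
--     ans = 0
--     for i, c in enumerate(s):
--         k, j = last.get(c, (-1, -1))
--         ans += (i - j) * (j - k)
--         last[c] = (j, i)
--     for k, j in last.values():
--         ans += (n - j) * (j - k)
--     return ans
-- ===== Notes on version B (the rewrite author's own statement) =====
-- stated objective: alternative
-- what changed: B replaces A's group-by-character dict of full occurrence-index lists with padded sentinels and a per-character inner range loop by a single left-to-right pass keeping only the last two occurrence indices per character plus a running answer, closed by one tail sweep over the dict.
import Mathlib
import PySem

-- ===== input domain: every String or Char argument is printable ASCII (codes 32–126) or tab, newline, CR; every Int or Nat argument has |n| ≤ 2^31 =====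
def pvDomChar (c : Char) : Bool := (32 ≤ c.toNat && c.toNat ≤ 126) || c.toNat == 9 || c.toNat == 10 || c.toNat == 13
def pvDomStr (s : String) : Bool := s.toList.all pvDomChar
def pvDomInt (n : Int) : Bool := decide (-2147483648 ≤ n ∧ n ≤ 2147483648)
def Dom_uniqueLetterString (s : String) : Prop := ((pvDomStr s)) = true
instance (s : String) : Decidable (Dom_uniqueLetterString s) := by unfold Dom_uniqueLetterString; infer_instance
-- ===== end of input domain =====

-- B replaces A's per-character occurrence lists (with sentinels and an inner index loop) by a
-- single pass keeping the last two occurrence indices per character; same results, same O(n) cost.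

-- ===== PORT A =====
-- Literal port of A: build m[c] = list of indices of c, then for each key pad with -1 and n and
-- sum consecutive gap products.  A's reassignment 'm[k] = [-1] + m[k] + [n]' only affects the key
-- being processed, so it is transcribed as the local binding mk.  All inner-loop indices are in
-- range, so pyGetD with default 0 is exact (no IndexError is reachable).
def uniqueLetterString (s : String) : Int :=
  let n : Int := PySem.Str.len s
  let m : PySem.Dict Char (List Int) :=
    (PySem.List.enumerate s.toList).foldl
      (fun d p => d.modify p.2 [] (· ++ [p.1])) PySem.Dict.empty
  m.keys.foldl
    (fun ans k =>
      let mk : List Int := [-1] ++ m.getD k [] ++ [n]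
      (PySem.List.pyRange 1 ((mk.length : Int) - 1) 1).foldl
        (fun a i =>
          a + (PySem.List.pyGetD mk i 0 - PySem.List.pyGetD mk (i - 1) 0)
            * (PySem.List.pyGetD mk (i + 1) 0 - PySem.List.pyGetD mk i 0)) ans)
    0

-- ===== PORT B =====
-- Literal port of B (Source B): one pass with state (last, ans), then the tail sweep over last.values().
def uniqueLetterString_alt (s : String) : Int :=
  let n : Int := PySem.Str.len s
  let st : PySem.Dict Char (Int × Int) × Int :=
    (PySem.List.enumerate s.toList).foldl
      (fun st p =>
        let kj := st.1.getD p.2 (-1, -1)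
        (st.1.insert p.2 (kj.2, p.1), st.2 + (p.1 - kj.2) * (kj.2 - kj.1)))
      (PySem.Dict.empty, 0)
  st.1.values.foldl (fun ans kj => ans + (n - kj.2) * (kj.2 - kj.1)) st.2

-- ===== PRECONDITION & SPEC =====
def Spec_uniqueLetterString (s : String) (out : Int) : Prop := out = uniqueLetterString_alt s
instance (s : String) (out : Int) : Decidable (Spec_uniqueLetterString s out) := by unfold Spec_uniqueLetterString; infer_instance

-- ===== CLAIM (what is proved, stated in full; the proofs are below) =====
def Claim_equal_uniqueLetterString : Prop := ∀ (s : String), Dom_uniqueLetterString s → Spec_uniqueLetterString s (uniqueLetterString s)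

-- ===== LEMMAS AND PROOFS =====

-- occurrence indices of character c in the enumerated list e
def pvOcc (c : Char) (e : List (Int × Char)) : List Int :=
  (e.filter (fun q => q.2 == c)).map (·.1)

-- B's per-character state machine: (last two indices, closed contribution)
def pvRun (ps : List Int) : (Int × Int) × Int :=
  ps.foldl (fun st x => ((st.1.2, x), st.2 + (x - st.1.2) * (st.1.2 - st.1.1))) ((-1, -1), 0)

-- structural triple sum: S prev l hi = Σ (x - prev)(next - x) over l with right sentinel hi
def pvS : Int → List Int → Int → Int
  | _, [], _ => 0
  | prev, x :: rest, hi => (x - prev) * ((rest ++ [hi]).getD 0 0 - x) + pvS x rest hi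

-- Nat-indexed version of A's inner sum
def pvNatTA (r : List Int) : Int :=
  ((List.range (r.length - 2)).map
    (fun k => (r.getD (k + 1) 0 - r.getD k 0) * (r.getD (k + 2) 0 - r.getD (k + 1) 0))).sum

theorem pvRun_append (ps : List Int) (x : Int) :
    pvRun (ps ++ [x]) =
      (((pvRun ps).1.2, x), (pvRun ps).2 + (x - (pvRun ps).1.2) * ((pvRun ps).1.2 - (pvRun ps).1.1)) := by
  simp [pvRun, List.foldl_append]

theorem pvSum_map_add {α : Type} (K : List α) (f g : α → Int) :
    (K.map (fun c => f c + g c)).sum = (K.map f).sum + (K.map g).sum := by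
  induction K with
  | nil => simp
  | cons a t ih => simp [ih]; ring

theorem pvSum_update {α : Type} [DecidableEq α] (K : List α) (f g : α → Int) (c : α)
    (hnd : K.Nodup) (hc : c ∈ K) (hoff : ∀ x ∈ K, x ≠ c → f x = g x) :
    (K.map f).sum = (K.map g).sum + (f c - g c) := by
  induction K with
  | nil => cases hc
  | cons a t ih =>
    rcases List.mem_cons.mp hc with h | h
    · subst h
      have : ∀ x ∈ t, f x = g x := fun x hx =>
        hoff x (List.mem_cons_of_mem _ hx) (fun he => (List.nodup_cons.mp hnd).1 (he ▸ hx))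
      have ht : t.map f = t.map g := List.map_congr_left this
      simp [ht]; ring
    · have hac : a ≠ c := fun he => (List.nodup_cons.mp hnd).1 (he ▸ h)
      have := ih (List.nodup_cons.mp hnd).2 h (fun x hx => hoff x (List.mem_cons_of_mem _ hx))
      simp [hoff a (List.mem_cons_self) hac, this]; ring

-- A's pyRange/pyGetD inner sum equals the Nat-indexed sum
theorem pvTA_eq_natTA (r : List Int) (ans : Int) :
    (PySem.List.pyRange 1 ((r.length : Int) - 1) 1).foldl
      (fun a i =>
        a + (PySem.List.pyGetD r i 0 - PySem.List.pyGetD r (i - 1) 0)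
          * (PySem.List.pyGetD r (i + 1) 0 - PySem.List.pyGetD r i 0)) ans
    = ans + pvNatTA r := by
  rw [PySem.List.foldl_add]
  congr 1
  rw [PySem.List.pyRange_one]
  have hlen : ((r.length : Int) - 1 - 1).toNat = r.length - 2 := by omega
  rw [hlen, List.map_map]
  unfold pvNatTA
  congr 1
  apply List.map_congr_left
  intro k _
  have h1 : (1 : Int) + (k : Int) = ((k + 1 : Nat) : Int) := by push_cast; ring
  have h2 : ((k + 1 : Nat) : Int) - 1 = ((k : Nat) : Int) := by push_cast; ring
  have h3 : ((k + 1 : Nat) : Int) + 1 = ((k + 2 : Nat) : Int) := by push_cast; ring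
  simp only [Function.comp, h1]
  simp only [h2, h3]
  simp only [PySem.List.pyGetD_natCast]

-- the Nat-indexed triple sum is the structural one
theorem pvNatTA_eq_S (l : List Int) : ∀ (prev hi : Int),
    pvNatTA (prev :: (l ++ [hi])) = pvS prev l hi := by
  induction l with
  | nil => intro prev hi; simp [pvNatTA, pvS]
  | cons x t ih =>
    intro prev hi
    have hS := ih x hi
    have hl2 : (x :: (t ++ [hi])).length - 2 = t.length := by simp
    unfold pvNatTA at hS ⊢
    rw [hl2] at hS
    simp only [List.cons_append]
    have hlen : (prev :: x :: (t ++ [hi])).length - 2 = t.length + 1 := by simp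
    rw [hlen, List.range_succ_eq_map, List.map_cons, List.sum_cons, List.map_map]
    rw [pvS]
    have hhead : ((prev :: x :: (t ++ [hi])).getD (0 + 1) 0 - (prev :: x :: (t ++ [hi])).getD 0 0)
        * ((prev :: x :: (t ++ [hi])).getD (0 + 2) 0 - (prev :: x :: (t ++ [hi])).getD (0 + 1) 0)
        = (x - prev) * ((t ++ [hi]).getD 0 0 - x) := by
      simp [List.getD]
    have htail : ((List.range t.length).map
        ((fun k => ((prev :: x :: (t ++ [hi])).getD (k + 1) 0 - (prev :: x :: (t ++ [hi])).getD k 0)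
          * ((prev :: x :: (t ++ [hi])).getD (k + 2) 0 - (prev :: x :: (t ++ [hi])).getD (k + 1) 0))
          ∘ Nat.succ)).sum = pvS x t hi := by
      rw [← hS]
      refine congrArg List.sum (List.map_congr_left fun k hk => ?_)
      have e2 : k + 2 = (k + 1) + 1 := rfl
      have e3 : k + 3 = (k + 2) + 1 := rfl
      simp [Function.comp, List.getD, Nat.succ_eq_add_one, e2, e3]
    rw [hhead, htail]

-- B's per-character total (closed sum + open tail term) is the structural triple sum
theorem pvRun_total (ps : List Int) : ∀ (k j acc hi : Int),
    (ps.foldl (fun st x => ((st.1.2, x), st.2 + (x - st.1.2) * (st.1.2 - st.1.1))) ((k, j), acc)).2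
      + (hi - (ps.foldl (fun st x => ((st.1.2, x), st.2 + (x - st.1.2) * (st.1.2 - st.1.1))) ((k, j), acc)).1.2)
        * ((ps.foldl (fun st x => ((st.1.2, x), st.2 + (x - st.1.2) * (st.1.2 - st.1.1))) ((k, j), acc)).1.2
           - (ps.foldl (fun st x => ((st.1.2, x), st.2 + (x - st.1.2) * (st.1.2 - st.1.1))) ((k, j), acc)).1.1)
    = acc + ((ps ++ [hi]).getD 0 0 - j) * (j - k) + pvS j ps hi := by
  induction ps with
  | nil => intro k j acc hi; simp [pvS]
  | cons x t ih =>
    intro k j acc hi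
    simp only [List.foldl_cons]
    rw [ih]
    rw [pvS]
    simp only [List.cons_append, List.getD_cons_zero]
    ring

theorem pvTotal_eq (ps : List Int) (hi : Int) :
    (pvRun ps).2 + (hi - (pvRun ps).1.2) * ((pvRun ps).1.2 - (pvRun ps).1.1)
      = pvS (-1) ps hi := by
  unfold pvRun
  rw [pvRun_total ps (-1) (-1) 0 hi]
  ring

-- occurrences after appending one enumerated pair
theorem pvOcc_append_self (e : List (Int × Char)) (p : Int × Char) :
    pvOcc p.2 (e ++ [p]) = pvOcc p.2 e ++ [p.1] := by
  unfold pvOcc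
  rw [List.filter_append]
  simp

theorem pvOcc_append_ne (c : Char) (e : List (Int × Char)) (p : Int × Char) (h : c ≠ p.2) :
    pvOcc c (e ++ [p]) = pvOcc c e := by
  unfold pvOcc
  rw [List.filter_append]
  simp [Ne.symm h]

theorem pvOcc_nil_of_not_mem (c : Char) (e : List (Int × Char))
    (h : c ∉ e.map (·.2)) : pvOcc c e = [] := by
  unfold pvOcc
  rw [List.filter_eq_nil_iff.mpr, List.map_nil]
  intro q hq hq2
  exact h (List.mem_map.mpr ⟨q, hq, by simpa using hq2⟩)

-- the full invariant of B's single pass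
theorem pvB_invariant (e : List (Int × Char)) :
    (e.foldl (fun st p =>
        (st.1.insert p.2 ((st.1.getD p.2 (-1, -1)).2, p.1),
         st.2 + (p.1 - (st.1.getD p.2 (-1, -1)).2)
              * ((st.1.getD p.2 (-1, -1)).2 - (st.1.getD p.2 (-1, -1)).1)))
      ((PySem.Dict.empty : PySem.Dict Char (Int × Int)), (0 : Int))).1.keys
        = PySem.Set.ofList (e.map (·.2))
    ∧ (∀ c, (e.foldl (fun st p =>
        (st.1.insert p.2 ((st.1.getD p.2 (-1, -1)).2, p.1),
         st.2 + (p.1 - (st.1.getD p.2 (-1, -1)).2)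
              * ((st.1.getD p.2 (-1, -1)).2 - (st.1.getD p.2 (-1, -1)).1)))
      ((PySem.Dict.empty : PySem.Dict Char (Int × Int)), (0 : Int))).1.getD c (-1, -1)
        = (pvRun (pvOcc c e)).1)
    ∧ (e.foldl (fun st p =>
        (st.1.insert p.2 ((st.1.getD p.2 (-1, -1)).2, p.1),
         st.2 + (p.1 - (st.1.getD p.2 (-1, -1)).2)
              * ((st.1.getD p.2 (-1, -1)).2 - (st.1.getD p.2 (-1, -1)).1)))
      ((PySem.Dict.empty : PySem.Dict Char (Int × Int)), (0 : Int))).2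
        = ((PySem.Set.ofList (e.map (·.2))).map (fun c => (pvRun (pvOcc c e)).2)).sum := by
  induction e using List.reverseRecOn with
  | nil =>
    refine ⟨by simp [PySem.Set.ofList_nil], fun c => by simp [pvOcc, pvRun],
      by simp [PySem.Set.ofList_nil]⟩
  | append_singleton e p ih =>
    obtain ⟨hkeys, hget, hans⟩ := ih
    rw [List.foldl_append] at *
    simp only [List.foldl_cons, List.foldl_nil]
    set F := e.foldl (fun st p =>
        (st.1.insert p.2 ((st.1.getD p.2 (-1, -1)).2, p.1),
         st.2 + (p.1 - (st.1.getD p.2 (-1, -1)).2)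
              * ((st.1.getD p.2 (-1, -1)).2 - (st.1.getD p.2 (-1, -1)).1)))
      ((PySem.Dict.empty : PySem.Dict Char (Int × Int)), (0 : Int)) with hF
    have hnodup : F.1.keys.Nodup := hkeys ▸ PySem.Set.nodup_ofList _
    have hmapsnd : (e ++ [p]).map (·.2) = e.map (·.2) ++ [p.2] := by simp
    have hsetnew : PySem.Set.ofList ((e ++ [p]).map (·.2))
        = PySem.Set.add (PySem.Set.ofList (e.map (·.2))) p.2 := by
      rw [hmapsnd, PySem.Set.ofList_append_singleton]
    refine ⟨?_, ?_, ?_⟩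
    · -- keys
      by_cases hmem : p.2 ∈ F.1.keys
      · rw [PySem.Dict.keys_insert_of_contains F.1 _
            ((PySem.Dict.contains_iff_mem_keys _ _).mpr hmem)]
        rw [hsetnew, PySem.Set.add_of_mem (hkeys ▸ hmem), hkeys]
      · have hcf : F.1.contains p.2 = false := by
          rw [Bool.eq_false_iff]
          exact fun h => hmem ((PySem.Dict.contains_iff_mem_keys _ _).mp h)
        rw [PySem.Dict.keys_insert_of_not_contains F.1 _ hcf]
        rw [hsetnew, PySem.Set.add_of_not_mem (hkeys ▸ hmem), hkeys]
    · -- getD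
      intro c
      by_cases hc : c = p.2
      · subst hc
        rw [PySem.Dict.getD_insert_self, pvOcc_append_self, pvRun_append, hget p.2]
      · rw [PySem.Dict.getD_insert_of_ne F.1 _ _ hc, hget c, pvOcc_append_ne c e p hc]
    · -- ans
      rw [hans, hget p.2, hsetnew]
      by_cases hmem : p.2 ∈ PySem.Set.ofList (e.map (·.2))
      · rw [PySem.Set.add_of_mem hmem]
        have hupd := pvSum_update (PySem.Set.ofList (e.map (·.2)))
          (fun c => (pvRun (pvOcc c (e ++ [p]))).2)
          (fun c => (pvRun (pvOcc c e)).2) p.2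
          (PySem.Set.nodup_ofList _) hmem
          (fun x _ hx => by
            show (pvRun (pvOcc x (e ++ [p]))).2 = (pvRun (pvOcc x e)).2
            rw [pvOcc_append_ne x e p hx])
        rw [hupd]
        simp only [pvOcc_append_self, pvRun_append]
        try ring
      · rw [PySem.Set.add_of_not_mem hmem, List.map_append, List.sum_append]
        have hsame : (PySem.Set.ofList (e.map (·.2))).map (fun c => (pvRun (pvOcc c (e ++ [p]))).2)
            = (PySem.Set.ofList (e.map (·.2))).map (fun c => (pvRun (pvOcc c e)).2) := by
          apply List.map_congr_left
          intro x hx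
          show (pvRun (pvOcc x (e ++ [p]))).2 = (pvRun (pvOcc x e)).2
          rw [pvOcc_append_ne x e p (fun h => hmem (h ▸ hx))]
        have hnotin : pvOcc p.2 e = [] := by
          apply pvOcc_nil_of_not_mem
          exact fun h => hmem ((PySem.Set.mem_ofList _ _).mpr h)
        rw [hsame]
        simp only [List.map_cons, List.map_nil, List.sum_cons, List.sum_nil,
          pvOcc_append_self, hnotin, pvRun_append]
        simp [pvRun]
        try ring

-- A's dict: lookup and keys
theorem pvA_dict (e : List (Int × Char)) :
    (∀ c, (e.foldl (fun d p => d.modify p.2 [] (· ++ [p.1]))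
        (PySem.Dict.empty : PySem.Dict Char (List Int))).getD c [] = pvOcc c e)
    ∧ (e.foldl (fun d p => d.modify p.2 [] (· ++ [p.1]))
        (PySem.Dict.empty : PySem.Dict Char (List Int))).keys
        = PySem.Set.ofList (e.map (·.2)) := by
  have hswap : e.foldl (fun d p => d.modify p.2 [] (· ++ [p.1]))
      (PySem.Dict.empty : PySem.Dict Char (List Int))
      = (e.map Prod.swap).foldl (fun d p => d.modify p.1 [] (· ++ [p.2]))
        (PySem.Dict.empty : PySem.Dict Char (List Int)) := by
    rw [List.foldl_map]
    rfl
  constructor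
  · intro c
    rw [hswap, PySem.Dict.getD_foldl_modify_append]
    unfold pvOcc
    rw [List.filter_map]
    simp [Function.comp_def, List.map_map]
  · rw [hswap]
    rw [PySem.Dict.keys_foldl_modify_key]
    rw [show (PySem.Dict.empty : PySem.Dict Char (List Int)).keys = [] from rfl]
    have hm : e.map (Prod.fst ∘ Prod.swap) = e.map (·.2) := by simp [Function.comp_def]
    rw [List.map_map, hm, PySem.Set.update_nil_left]

-- evaluate A to the per-character structural sum
theorem pvA_eval (s : String) :
    uniqueLetterString s
      = ((PySem.Set.ofList s.toList).map
          (fun c => pvS (-1) (pvOcc c (PySem.List.enumerate s.toList)) (PySem.Str.len s))).sum := by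
  obtain ⟨hget, hkeys⟩ := pvA_dict (PySem.List.enumerate s.toList)
  unfold uniqueLetterString
  simp only []
  rw [PySem.List.foldl_congr_mem _ _
      (fun ans k => ans + pvNatTA ([-1] ++
        ((PySem.List.enumerate s.toList).foldl (fun d p => d.modify p.2 [] (· ++ [p.1]))
          (PySem.Dict.empty : PySem.Dict Char (List Int))).getD k [] ++ [PySem.Str.len s])) _
      (fun acc k _ => pvTA_eq_natTA _ acc)]
  rw [PySem.List.foldl_add, zero_add]
  rw [hkeys, PySem.List.map_snd_enumerate]
  refine congrArg List.sum (List.map_congr_left fun c _ => ?_)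
  rw [hget c]
  have hsh : [-1] ++ pvOcc c (PySem.List.enumerate s.toList) ++ [PySem.Str.len s]
      = (-1) :: (pvOcc c (PySem.List.enumerate s.toList) ++ [PySem.Str.len s]) := by
    simp
  rw [hsh, pvNatTA_eq_S]

-- evaluate B to the same per-character structural sum
theorem pvB_eval (s : String) :
    uniqueLetterString_alt s
      = ((PySem.Set.ofList s.toList).map
          (fun c => pvS (-1) (pvOcc c (PySem.List.enumerate s.toList)) (PySem.Str.len s))).sum := by
  obtain ⟨hkeys, hget, hans⟩ := pvB_invariant (PySem.List.enumerate s.toList)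
  unfold uniqueLetterString_alt
  simp only []
  rw [PySem.List.foldl_add]
  have hnodup : ((PySem.List.enumerate s.toList).foldl (fun st p =>
        (st.1.insert p.2 ((st.1.getD p.2 (-1, -1)).2, p.1),
         st.2 + (p.1 - (st.1.getD p.2 (-1, -1)).2)
              * ((st.1.getD p.2 (-1, -1)).2 - (st.1.getD p.2 (-1, -1)).1)))
      ((PySem.Dict.empty : PySem.Dict Char (Int × Int)), (0 : Int))).1.keys.Nodup :=
    hkeys ▸ PySem.Set.nodup_ofList _
  rw [PySem.Dict.values_eq_map_keys _ hnodup (-1, -1)]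
  rw [List.map_map, hans, hkeys, PySem.List.map_snd_enumerate]
  rw [← pvSum_map_add]
  refine congrArg List.sum (List.map_congr_left fun c _ => ?_)
  simp only [Function.comp_apply, hget c]
  exact pvTotal_eq _ _

-- ===== VERDICT (by name: the statement is the Claim_ definition above) =====
theorem uniqueLetterString_spec : Claim_equal_uniqueLetterString := by
  intro s _
  unfold Spec_uniqueLetterString
  rw [pvA_eval, pvB_eval]
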